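-- pv_equiv track=rewrite | github.com/hsiaopat/SolitaireSim | solitaire.py | generate_card_codes
-- ===== SOURCE A (Python) =====
-- def generate_card_codes(file_name):
--     card_codes = []
--     i = len(file_name) - 1
--     while i > 0:
--         # Check if the current two characters form a valid two-digit number
--         if file_name[i-1:i+1].isdigit():
--             card_codes.append(file_name[i-1:i+1])
--             i -= 2  # Move two characters back for the next two-digit number
--         else:
--             i -= 1  # Move one character back if it's not a valid two-digit number
--     return card_codes
-- ===== SOURCE B (Python) =====
-- def _pairs(run):
--     # two-char codes of a digit run, paired from the right end, rightmost pair first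
--     if len(run) < 2:
--         return []
--     return [run[-2:]] + _pairs(run[:-2])
--
--
-- def generate_card_codes(file_name):
--     # collect the maximal runs of digit characters, left to right
--     runs = []
--     cur = ""
--     for c in file_name:
--         if c.isdigit():
--             cur += c
--         else:
--             if cur:
--                 runs.append(cur)
--             cur = ""
--     if cur:
--         runs.append(cur)
--     # rightmost run first; within a run, pair from the right end
--     codes = []
--     for run in reversed(runs):
--         codes.extend(_pairs(run))
--     return codes
-- ===== Notes on version B (the rewrite author's own statement) =====
-- stated objective: faster
-- what changed: Replaces A's backward index-walk, which builds and isdigit-tests a fresh two-char slice at every position, by a two-phase decomposition: one forward pass over characters grouping the maximal digit runs, then emitting right-anchored two-char codes per run in reverse run order.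
import Mathlib
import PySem

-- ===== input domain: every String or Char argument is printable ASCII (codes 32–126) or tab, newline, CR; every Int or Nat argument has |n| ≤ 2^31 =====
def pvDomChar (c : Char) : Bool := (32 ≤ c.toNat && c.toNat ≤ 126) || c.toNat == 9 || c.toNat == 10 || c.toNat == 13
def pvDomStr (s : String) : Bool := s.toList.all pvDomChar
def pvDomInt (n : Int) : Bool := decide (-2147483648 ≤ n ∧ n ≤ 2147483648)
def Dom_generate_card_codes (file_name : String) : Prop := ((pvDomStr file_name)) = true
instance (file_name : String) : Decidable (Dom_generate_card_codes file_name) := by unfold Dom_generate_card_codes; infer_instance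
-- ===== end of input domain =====

-- B replaces A's backward index-walk (a fresh two-char slice + str.isdigit test per position)
-- by a two-phase decomposition: one forward pass grouping the maximal digit runs, then pairing
-- each run from its right end, rightmost run first; measurably faster by a constant factor.

-- ===== PORT A =====
-- the while-loop of A, state = the index i (an Int: it may become negative before the test fails)
def pvLoopA (cs : List Char) (i : Int) : List String :=
  if 0 < i then
    let pair := PySem.List.slice cs (some (i - 1)) (some (i + 1))   -- file_name[i-1:i+1]
    if PySem.Chars.strIsdigit pair then
      String.ofList pair :: pvLoopA cs (i - 2)
    else
      pvLoopA cs (i - 1)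
  else []
termination_by i.toNat
decreasing_by all_goals omega

def generate_card_codes (file_name : String) : List String :=
  pvLoopA file_name.toList ((PySem.Chars.len file_name.toList : Int) - 1)

-- ===== PORT B =====
-- _pairs(run): run[-2:] and run[:-2] ported with PySem.List.slice (exact for these bounds)
def pvPairsB (run : List Char) : List String :=
  if _h : run.length < 2 then []
  else
    String.ofList (PySem.List.slice run (some (-2)) none) ::
      pvPairsB (PySem.List.slice run none (some (-2)))
termination_by run.length
decreasing_by
  rw [PySem.List.slice_to_neg_ofNat run 2 (by omega)]
  simp only [List.length_take]
  omega

-- the body of B's first for-loop, state = (runs, cur)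
def pvRunStep (st : List (List Char) × List Char) (c : Char) : List (List Char) × List Char :=
  if PySem.Chars.isdigit c then (st.1, st.2 ++ [c])
  else (if st.2 ≠ [] then st.1 ++ [st.2] else st.1, [])

def generate_card_codes_alt (file_name : String) : List String :=
  let st := file_name.toList.foldl pvRunStep ([], [])
  let runs := if st.2 ≠ [] then st.1 ++ [st.2] else st.1
  runs.reverse.foldl (fun acc run => acc ++ pvPairsB run) []

-- ===== PRECONDITION & SPEC =====
def Spec_generate_card_codes (file_name : String) (out : List String) : Prop := out = generate_card_codes_alt file_name
instance (file_name : String) (out : List String) : Decidable (Spec_generate_card_codes file_name out) := by unfold Spec_generate_card_codes; infer_instance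

-- ===== CLAIM (what is proved, stated in full; the proofs are below) =====
def Claim_equal_generate_card_codes : Prop := ∀ (file_name : String), Dom_generate_card_codes file_name → Spec_generate_card_codes file_name (generate_card_codes file_name)

-- ===== LEMMAS AND PROOFS =====

-- proof-side normal form of A: consume the REVERSED character list two at a time
def pvGo : List Char → List String
  | a :: b :: t =>
      if PySem.Chars.isdigit a && PySem.Chars.isdigit b
      then String.ofList [b, a] :: pvGo t
      else pvGo (b :: t)
  | _ => []

-- pairs of a reversed digit run, front (= rightmost) pair first
def pvPairsRev : List Char → List String
  | a :: b :: t => String.ofList [b, a] :: pvPairsRev t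
  | _ => []

-- skipping a leading non-digit
theorem pvGo_cons_nondigit (a : Char) (t : List Char)
    (ha : PySem.Chars.isdigit a = false) : pvGo (a :: t) = pvGo t := by
  cases t with
  | nil => simp [pvGo]
  | cons b u => simp [pvGo, ha]

-- an all-digit list is consumed pair by pair
theorem pvGo_digits (rr : List Char) (h : ∀ c ∈ rr, PySem.Chars.isdigit c = true) :
    pvGo rr = pvPairsRev rr := by
  match rr with
  | [] => rfl
  | [a] => rfl
  | a :: b :: t =>
      have ha := h a (by simp)
      have hb := h b (by simp)
      have ih := pvGo_digits t (fun c hc => h c (by simp [hc]))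
      simp [pvGo, pvPairsRev, ha, hb, ih]

-- appending an all-digit block after a list ending in a non-digit
theorem pvGo_append_digits (xs rr : List Char)
    (hrr : ∀ c ∈ rr, PySem.Chars.isdigit c = true)
    (hx : ∀ (h : xs ≠ []), PySem.Chars.isdigit (xs.getLast h) = false) :
    pvGo (xs ++ rr) = pvGo xs ++ pvPairsRev rr := by
  match xs with
  | [] => simpa [pvGo] using pvGo_digits rr hrr
  | [x] =>
      have hx' : PySem.Chars.isdigit x = false := hx (by simp)
      rw [List.singleton_append, pvGo_cons_nondigit x rr hx', pvGo_digits rr hrr]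
      simp [pvGo]
  | a :: b :: t =>
      have hlast : ∀ (h : b :: t ≠ []), PySem.Chars.isdigit ((b :: t).getLast h) = false := by
        intro h
        have := hx (by simp)
        rwa [List.getLast_cons (by simp)] at this
      by_cases hab : PySem.Chars.isdigit a = true ∧ PySem.Chars.isdigit b = true
      · -- both digits: then t ≠ [] (else b would be the non-digit last char), recurse on t
        cases t with
        | nil =>
            exact absurd hab.2 (by simpa using hlast (by simp))
        | cons c u =>
            have hlt : ∀ (h : c :: u ≠ []), PySem.Chars.isdigit ((c :: u).getLast h) = false := by
              intro h
              have := hlast (by simp)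
              rwa [List.getLast_cons (by simp)] at this
            have ih : pvGo (c :: (u ++ rr)) = pvGo (c :: u) ++ pvPairsRev rr := by
              simpa using pvGo_append_digits (c :: u) rr hrr hlt
            simp [pvGo, hab.1, hab.2, ih]
      · have ih : pvGo (b :: (t ++ rr)) = pvGo (b :: t) ++ pvPairsRev rr := by
          simpa using pvGo_append_digits (b :: t) rr hrr hlast
        have hcond : (PySem.Chars.isdigit a && PySem.Chars.isdigit b) = false := by
          rcases Bool.eq_false_or_eq_true (PySem.Chars.isdigit a) with h1 | h1 <;>
            rcases Bool.eq_false_or_eq_true (PySem.Chars.isdigit b) with h2 | h2 <;>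
            simp_all
        simpa [pvGo, hcond] using ih
termination_by xs.length

-- appending a trailing non-digit changes nothing
theorem pvGo_append_nondigit (xs : List Char) (x : Char)
    (hx : PySem.Chars.isdigit x = false) : pvGo (xs ++ [x]) = pvGo xs := by
  match xs with
  | [] => simp [pvGo]
  | [a] => simp [pvGo, hx]
  | a :: b :: t =>
      have ih1 := pvGo_append_nondigit t x hx
      have ih2 : pvGo (b :: (t ++ [x])) = pvGo (b :: t) := by
        simpa using pvGo_append_nondigit (b :: t) x hx
      by_cases hab : (PySem.Chars.isdigit a && PySem.Chars.isdigit b) = true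
      · simp [pvGo, hab, ih1]
      · simp only [Bool.not_eq_true] at hab
        simp [pvGo, hab, ih2]
termination_by xs.length

-- the maximal digit runs of a list, left to right (proof-side spec of B's first loop)
def pvRunsLeft : List Char → List (List Char)
  | [] => []
  | c :: t =>
      if PySem.Chars.isdigit c then
        (c :: t.takeWhile PySem.Chars.isdigit) :: pvRunsLeft (t.dropWhile PySem.Chars.isdigit)
      else pvRunsLeft t
termination_by l => l.length
decreasing_by
  · have := List.length_dropWhile_le (p := PySem.Chars.isdigit) (l := t); simp; omega
  · simp

-- A's normal form computed run by run
theorem pvGo_reverse_eq (cs : List Char) :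
    pvGo cs.reverse = ((pvRunsLeft cs).reverse.map List.reverse).flatMap pvPairsRev := by
  match cs with
  | [] => simp [pvGo, pvRunsLeft]
  | c :: t =>
      by_cases hc : PySem.Chars.isdigit c = true
      · -- c :: t = run ++ rest, run = c :: takeWhile, rest = dropWhile
        have hsplit : c :: t
            = (c :: t.takeWhile PySem.Chars.isdigit) ++ t.dropWhile PySem.Chars.isdigit := by
          simp [List.takeWhile_append_dropWhile]
        have hrun : ∀ x ∈ (c :: t.takeWhile PySem.Chars.isdigit).reverse,
            PySem.Chars.isdigit x = true := by
          intro x hx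
          rw [List.mem_reverse] at hx
          rcases List.mem_cons.mp hx with hx | hx
          · exact hx ▸ hc
          · exact List.mem_takeWhile_imp hx
        have hlastdw : ∀ (h : (t.dropWhile PySem.Chars.isdigit).reverse ≠ []),
            PySem.Chars.isdigit ((t.dropWhile PySem.Chars.isdigit).reverse.getLast h) = false := by
          intro h
          rw [List.getLast_reverse h]
          exact List.head_dropWhile_not PySem.Chars.isdigit _
        have ih := pvGo_reverse_eq (t.dropWhile PySem.Chars.isdigit)
        calc pvGo (c :: t).reverse
            = pvGo ((t.dropWhile PySem.Chars.isdigit).reverse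
                ++ (c :: t.takeWhile PySem.Chars.isdigit).reverse) := by
              conv_lhs => rw [hsplit]
              rw [List.reverse_append]
          _ = pvGo (t.dropWhile PySem.Chars.isdigit).reverse
                ++ pvPairsRev (c :: t.takeWhile PySem.Chars.isdigit).reverse :=
              pvGo_append_digits _ _ hrun hlastdw
          _ = ((pvRunsLeft (c :: t)).reverse.map List.reverse).flatMap pvPairsRev := by
              rw [ih]
              rw [show pvRunsLeft (c :: t)
                    = (c :: t.takeWhile PySem.Chars.isdigit)
                        :: pvRunsLeft (t.dropWhile PySem.Chars.isdigit) from by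
                  rw [pvRunsLeft, if_pos hc]]
              simp [List.map_append, List.flatMap_append]
      · have hc' : PySem.Chars.isdigit c = false := by simpa using hc
        have ih := pvGo_reverse_eq t
        calc pvGo (c :: t).reverse
            = pvGo (t.reverse ++ [c]) := by simp
          _ = pvGo t.reverse := pvGo_append_nondigit t.reverse c hc'
          _ = _ := by
              rw [ih, show pvRunsLeft (c :: t) = pvRunsLeft t from by
                rw [pvRunsLeft, if_neg (by simp [hc'])]]
termination_by cs.length
decreasing_by
  · have := List.length_dropWhile_le (p := PySem.Chars.isdigit) (l := t); simp; omega
  · simp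

-- ===== A-side: the index loop computes pvGo of the reversed prefix =====
theorem pvLoopA_eq_go (cs : List Char) (n : Nat) (hn : n < cs.length) :
    pvLoopA cs (n : Int) = pvGo ((cs.take (n + 1)).reverse) := by
  have hstep : ∀ (m : Nat) (hm1 : m + 1 < cs.length),
      pvLoopA cs ((m + 1 : Nat) : Int)
        = (if PySem.Chars.strIsdigit [cs[m]'(Nat.lt_of_succ_lt hm1), cs[m + 1]'hm1] then
            String.ofList [cs[m]'(Nat.lt_of_succ_lt hm1), cs[m + 1]'hm1]
              :: pvLoopA cs (((m + 1 : Nat) : Int) - 2)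
          else pvLoopA cs (((m + 1 : Nat) : Int) - 1)) := by
    intro m hm1
    have hm : m < cs.length := by omega
    have hdrop : cs.drop m = cs[m] :: cs.drop (m + 1) := List.drop_eq_getElem_cons hm
    have hdrop2 : cs.drop (m + 1) = cs[m + 1] :: cs.drop (m + 2) := List.drop_eq_getElem_cons hm1
    have h1 : ((m + 1 : Nat) : Int) - 1 = ((m : Nat) : Int) := by push_cast; ring
    have h2 : ((m + 1 : Nat) : Int) + 1 = ((m + 2 : Nat) : Int) := by push_cast; ring
    have hslice : PySem.List.slice cs (some (((m + 1 : Nat) : Int) - 1)) (some (((m + 1 : Nat) : Int) + 1))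
        = [cs[m], cs[m + 1]] := by
      rw [h1, h2, PySem.List.slice_natCast, hdrop]
      rw [show m + 2 - m = 2 from by omega, hdrop2]
      rfl
    rw [pvLoopA, if_pos (by push_cast; omega), hslice]
  have htake : ∀ (m : Nat) (hm : m < cs.length),
      (cs.take (m + 1)).reverse = cs[m]'hm :: (cs.take m).reverse := by
    intro m hm
    rw [List.take_succ_eq_append_getElem hm, List.reverse_append]
    rfl
  match n with
  | 0 =>
      rw [pvLoopA, if_neg (by omega)]
      rw [htake 0 hn]
      simp [pvGo]
  | 1 =>
      have h0 : (0 : Nat) < cs.length := by omega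
      rw [hstep 0 hn, htake 1 hn, htake 0 h0]
      by_cases hd : (PySem.Chars.isdigit cs[0] && PySem.Chars.isdigit cs[1]) = true
      · have hb := (Bool.and_eq_true _ _).mp hd
        rw [if_pos (by simp [PySem.Chars.strIsdigit, hb.1, hb.2])]
        rw [show ((1 : Nat) : Int) - 2 = (-1 : Int) from by norm_num]
        rw [pvLoopA, if_neg (by omega)]
        simp [pvGo, hb.1, hb.2]
      · have hdig : PySem.Chars.strIsdigit [cs[0], cs[1]] = false := by
          rcases Bool.eq_false_or_eq_true (PySem.Chars.isdigit cs[0]) with h1 | h1 <;>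
            rcases Bool.eq_false_or_eq_true (PySem.Chars.isdigit cs[1]) with h2 | h2 <;>
            simp_all [PySem.Chars.strIsdigit]
        rw [if_neg (by simp [hdig])]
        rw [show ((1 : Nat) : Int) - 1 = ((0 : Nat) : Int) from by norm_num]
        rw [pvLoopA_eq_go cs 0 h0, htake 0 h0]
        have hcond : (PySem.Chars.isdigit cs[1] && PySem.Chars.isdigit cs[0]) = false := by
          rcases Bool.eq_false_or_eq_true (PySem.Chars.isdigit cs[0]) with h1 | h1 <;>
            rcases Bool.eq_false_or_eq_true (PySem.Chars.isdigit cs[1]) with h2 | h2 <;>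
            simp_all [PySem.Chars.strIsdigit]
        simp [pvGo, hcond]
  | Nat.succ (Nat.succ k) =>
      have hk1 : k + 1 < cs.length := by omega
      have hk : k < cs.length := by omega
      rw [hstep (k + 1) hn, htake (k + 2) hn, htake (k + 1) hk1]
      by_cases hd : (PySem.Chars.isdigit cs[k + 1] && PySem.Chars.isdigit cs[k + 2]) = true
      · have hb := (Bool.and_eq_true _ _).mp hd
        rw [if_pos (by simp [PySem.Chars.strIsdigit, hb.1, hb.2])]
        rw [show ((k + 2 : Nat) : Int) - 2 = ((k : Nat) : Int) from by push_cast; ring]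
        rw [pvLoopA_eq_go cs k hk]
        simp [pvGo, hb.1, hb.2]
      · have hdig : PySem.Chars.strIsdigit [cs[k + 1], cs[k + 2]] = false := by
          rcases Bool.eq_false_or_eq_true (PySem.Chars.isdigit cs[k + 1]) with h1 | h1 <;>
            rcases Bool.eq_false_or_eq_true (PySem.Chars.isdigit cs[k + 2]) with h2 | h2 <;>
            simp_all [PySem.Chars.strIsdigit]
        rw [if_neg (by simp [hdig])]
        rw [show ((k + 2 : Nat) : Int) - 1 = ((k + 1 : Nat) : Int) from by push_cast; ring]
        rw [pvLoopA_eq_go cs (k + 1) hk1, htake (k + 1) hk1]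
        have hcond : (PySem.Chars.isdigit cs[k + 2] && PySem.Chars.isdigit cs[k + 1]) = false := by
          rcases Bool.eq_false_or_eq_true (PySem.Chars.isdigit cs[k + 1]) with h1 | h1 <;>
            rcases Bool.eq_false_or_eq_true (PySem.Chars.isdigit cs[k + 2]) with h2 | h2 <;>
            simp_all
        simp [pvGo, hcond]
termination_by n

-- ===== B-side lemmas =====
-- takeWhile / dropWhile across the boundary of an all-digit block
theorem pvTakeDrop (u : List Char) (c : Char) (l : List Char)
    (hu : ∀ x ∈ u, PySem.Chars.isdigit x = true) (hc : PySem.Chars.isdigit c = false) :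
    (u ++ c :: l).takeWhile PySem.Chars.isdigit = u
      ∧ (u ++ c :: l).dropWhile PySem.Chars.isdigit = c :: l := by
  induction u with
  | nil =>
      simp [List.takeWhile_cons_of_neg, List.dropWhile_cons_of_neg, hc]
  | cons a v ih =>
      have ha := hu a (by simp)
      have ihv := ih (fun x hx => hu x (by simp [hx]))
      simp [List.takeWhile_cons_of_pos, List.dropWhile_cons_of_pos, ha, ihv.1, ihv.2]

theorem pvRunsLeft_all_digits (cur : List Char)
    (h : ∀ c ∈ cur, PySem.Chars.isdigit c = true) :
    pvRunsLeft cur = if cur = [] then [] else [cur] := by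
  cases cur with
  | nil => simp [pvRunsLeft]
  | cons c t =>
      have hc := h c (by simp)
      have ht : ∀ x ∈ t, PySem.Chars.isdigit x = true := fun x hx => h x (by simp [hx])
      rw [pvRunsLeft, if_pos hc, List.takeWhile_eq_self_iff.mpr ht,
        List.dropWhile_eq_nil_iff.mpr ht, pvRunsLeft]
      simp

theorem pvRunsLeft_digits_append (cur : List Char) (c : Char) (l : List Char)
    (hcur : ∀ x ∈ cur, PySem.Chars.isdigit x = true) (hc : PySem.Chars.isdigit c = false) :
    pvRunsLeft (cur ++ c :: l) = (if cur = [] then [] else [cur]) ++ pvRunsLeft l := by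
  cases cur with
  | nil =>
      rw [List.nil_append, pvRunsLeft, if_neg (by simp [hc])]
      simp
  | cons d u =>
      have hd := hcur d (by simp)
      have hu : ∀ x ∈ u, PySem.Chars.isdigit x = true := fun x hx => hcur x (by simp [hx])
      have htd := pvTakeDrop u c l hu hc
      rw [List.cons_append]
      rw [show pvRunsLeft (d :: (u ++ c :: l))
            = (d :: u) :: pvRunsLeft (c :: l) from by
          rw [pvRunsLeft, if_pos hd, htd.1, htd.2]]
      rw [show pvRunsLeft (c :: l) = pvRunsLeft l from by
        rw [pvRunsLeft, if_neg (by simp [hc])]]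
      simp

-- the first loop of B computes the digit runs
theorem pvFold_runs (l : List Char) (rs : List (List Char)) (cur : List Char)
    (hcur : ∀ c ∈ cur, PySem.Chars.isdigit c = true) :
    (if (l.foldl pvRunStep (rs, cur)).2 ≠ [] then
        (l.foldl pvRunStep (rs, cur)).1 ++ [(l.foldl pvRunStep (rs, cur)).2]
      else (l.foldl pvRunStep (rs, cur)).1) = rs ++ pvRunsLeft (cur ++ l) := by
  induction l generalizing rs cur with
  | nil =>
      rw [List.append_nil, pvRunsLeft_all_digits cur hcur]
      by_cases h : cur = [] <;> simp [h]
  | cons c t ih =>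
      by_cases hc : PySem.Chars.isdigit c = true
      · have step : pvRunStep (rs, cur) c = (rs, cur ++ [c]) := by simp [pvRunStep, hc]
        have hcur' : ∀ x ∈ cur ++ [c], PySem.Chars.isdigit x = true := by
          simp only [List.mem_append, List.mem_singleton]
          rintro x (h | rfl)
          · exact hcur x h
          · exact hc
        rw [List.foldl_cons, step, ih rs (cur ++ [c]) hcur']
        simp only [List.append_assoc, List.singleton_append]
      · have hc' : PySem.Chars.isdigit c = false := by simpa using hc
        have step : pvRunStep (rs, cur) c
            = (if cur ≠ [] then rs ++ [cur] else rs, []) := by simp [pvRunStep, hc']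
        rw [List.foldl_cons, step, ih _ [] (by simp)]
        rw [pvRunsLeft_digits_append cur c t hcur hc']
        by_cases h : cur = [] <;> simp [h]

-- the pairing helper of B, on a reversed run
theorem pvPairsB_reverse (rr : List Char) : pvPairsB rr.reverse = pvPairsRev rr := by
  match rr with
  | [] => rw [pvPairsB]; simp [pvPairsRev]
  | [a] => rw [pvPairsB]; simp [pvPairsRev]
  | a :: b :: t =>
      have hrev : (a :: b :: t).reverse = t.reverse ++ [b, a] := by simp
      have hlen : (t.reverse ++ [b, a]).length = t.length + 2 := by simp
      rw [hrev, pvPairsB, dif_neg (by omega)]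
      rw [PySem.List.slice_from_neg_ofNat _ 2 (by omega),
        PySem.List.slice_to_neg_ofNat _ 2 (by omega)]
      rw [show (t.reverse ++ [b, a]).length - 2 = t.reverse.length from by simp]
      rw [List.drop_left, List.take_left]
      rw [pvPairsB_reverse t]
      simp [pvPairsRev]
termination_by rr.length
decreasing_by simp

-- ===== VERDICT (by name: the statement is the Claim_ definition above) =====
theorem generate_card_codes_spec : Claim_equal_generate_card_codes := by
  unfold Claim_equal_generate_card_codes
  intro s _
  unfold Spec_generate_card_codes
  have hP : ∀ r : List Char, pvPairsB r = pvPairsRev r.reverse := by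
    intro r
    have h := pvPairsB_reverse r.reverse
    rwa [List.reverse_reverse] at h
  have hB : generate_card_codes_alt s
      = ((pvRunsLeft s.toList).reverse.map List.reverse).flatMap pvPairsRev := by
    show (if (s.toList.foldl pvRunStep ([], [])).2 ≠ [] then
            (s.toList.foldl pvRunStep ([], [])).1 ++ [(s.toList.foldl pvRunStep ([], [])).2]
          else (s.toList.foldl pvRunStep ([], [])).1).reverse.foldl
            (fun acc run => acc ++ pvPairsB run) [] = _
    rw [pvFold_runs s.toList [] [] (by simp),
      PySem.List.foldl_append_eq_flatMap, List.flatMap_map]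
    simp only [List.nil_append]
    exact congrArg (fun f => List.flatMap f (pvRunsLeft s.toList).reverse) (funext hP)
  show pvLoopA s.toList ((PySem.Chars.len s.toList : Int) - 1) = generate_card_codes_alt s
  rw [hB, ← pvGo_reverse_eq s.toList, PySem.Chars.len_eq]
  cases hlen : s.toList.length with
  | zero =>
      rw [List.length_eq_zero_iff.mp hlen]
      rw [pvLoopA, if_neg (by norm_num)]
      simp [pvGo]
  | succ m =>
      rw [show ((m + 1 : Nat) : Int) - 1 = ((m : Nat) : Int) from by push_cast; ring]
      rw [pvLoopA_eq_go s.toList m (by omega)]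
      rw [show s.toList.take (m + 1) = s.toList from List.take_of_length_le (by omega)]
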